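-- pv_equiv track=rewrite | github.com/SwastikMajumder/math_ai | physics.py | is_dup
-- ===== SOURCE A (Python) =====
-- def is_dup(lines, polygon):
--     if len(polygon) == 3:
--         return False
--     for i in range(len(polygon)-2):
--         for j in range(i+2, len(polygon)):
--             if i==0 and j==len(polygon)-1:
--                 continue
--             for k in range(len(lines)):
--                 if (polygon[i] in lines[k]) and (polygon[j] in lines[k]):
--                     count = 0
--                     for l in range(i, j):
--                         if polygon[l] not in lines[k]:
--                             count += 1
--                             break
--                     if j != len(polygon)-1:
--                         for l in range(j+1, len(polygon)):
--                             if count == 1 and (polygon[l] not in lines[k]):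
--                                 return True
--                     if i != 0:
--                         for l in range(0, i):
--                             if count == 1 and (polygon[l] not in lines[k]):
--                                 return True
--     return False
-- ===== SOURCE B (Python) =====
-- def is_dup(lines, polygon):
--     n = len(polygon)
--     if n == 3:
--         return False
--     for line in lines:
--         s = set(line)
--         off = [0]
--         for v in polygon:
--             off.append(off[-1] + (0 if v in s else 1))
--         total = off[n]
--         for i in range(n - 2):
--             if off[i + 1] > off[i]:
--                 continue  # polygon[i] is not on this line
--             for j in range(i + 2, n):
--                 if i == 0 and j == n - 1:
--                     continue
--                 if off[j + 1] > off[j]: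
--                     continue  # polygon[j] is not on this line
--                 if off[j] == off[i + 1]:
--                     continue  # no off-line vertex strictly between i and j
--                 before = off[i] if i != 0 else 0
--                 after = total - off[j + 1] if j != n - 1 else 0
--                 if before + after > 0:
--                     return True
--     return False
-- ===== Notes on version B (the rewrite author's own statement) =====
-- stated objective: faster
-- what changed: Per line, a single prefix-sum array of off-line vertex counts replaces A's three inner scans, so each (i,j) vertex pair is checked in O(1) instead of O(n), and line membership is a set lookup built once per line.
import Mathlib
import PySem

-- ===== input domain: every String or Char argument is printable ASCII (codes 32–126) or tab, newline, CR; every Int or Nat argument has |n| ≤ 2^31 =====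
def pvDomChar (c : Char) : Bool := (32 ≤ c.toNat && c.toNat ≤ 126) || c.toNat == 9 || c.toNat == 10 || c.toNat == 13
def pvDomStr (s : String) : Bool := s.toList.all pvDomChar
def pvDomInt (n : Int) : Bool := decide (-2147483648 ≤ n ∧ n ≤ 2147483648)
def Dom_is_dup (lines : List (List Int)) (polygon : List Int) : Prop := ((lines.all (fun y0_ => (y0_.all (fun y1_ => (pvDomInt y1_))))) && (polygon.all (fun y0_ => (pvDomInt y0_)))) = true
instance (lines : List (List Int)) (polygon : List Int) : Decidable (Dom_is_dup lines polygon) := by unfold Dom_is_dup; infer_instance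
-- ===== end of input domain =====

-- B replaces A's three inner O(n) scans per (i,j) pair by O(1) lookups in a per-line
-- prefix-sum array of off-line vertex counts (O(L*n^3) → O(L*n^2)); measured faster.

-- ===== PORT A =====
-- all indices produced by the loops are in range, so the default of pyGetD is never returned
def pvGetI (xs : List Int) (i : Int) : Int := PySem.List.pyGetD xs i 0
def pvGetL (xs : List (List Int)) (i : Int) : List Int := PySem.List.pyGetD xs i []

-- 'count = 0; for l in range(i, j): if polygon[l] not in lines[k]: count += 1; break'
def pvCountLoop (line polygon : List Int) : List Int → Int → Int
  | [], c => c
  | l :: rest, c =>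
    if !(line.contains (pvGetI polygon l)) then c + 1
    else pvCountLoop line polygon rest c

def is_dup (lines : List (List Int)) (polygon : List Int) : Bool :=
  let n : Int := polygon.length
  if n = 3 then false else
  (PySem.List.pyRange 0 (n - 2) 1).any (fun i =>
    (PySem.List.pyRange (i + 2) n 1).any (fun j =>
      if i = 0 ∧ j = n - 1 then false else
      (PySem.List.pyRange 0 lines.length 1).any (fun k =>
        let line := pvGetL lines k
        if line.contains (pvGetI polygon i) && line.contains (pvGetI polygon j) then
          let count := pvCountLoop line polygon (PySem.List.pyRange i j 1) 0
          ((if j ≠ n - 1 then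
              (PySem.List.pyRange (j + 1) n 1).any (fun l =>
                count == 1 && !(line.contains (pvGetI polygon l)))
            else false) ||
           (if i ≠ 0 then
              (PySem.List.pyRange 0 i 1).any (fun l =>
                count == 1 && !(line.contains (pvGetI polygon l)))
            else false))
        else false)))

-- ===== PORT B =====
-- 'off = [0]; for v in polygon: off.append(off[-1] + (0 if v in s else 1))'
def pvBuildOff (s : PySem.Set Int) (polygon : List Int) : List Int :=
  polygon.foldl
    (fun off v => off ++ [PySem.List.pyGetD off (-1) 0 + (if PySem.Set.contains s v then 0 else 1)])
    [0]

def is_dup_alt (lines : List (List Int)) (polygon : List Int) : Bool :=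
  let n : Int := polygon.length
  if n = 3 then false else
  lines.any (fun line =>
    let s := PySem.Set.ofList line
    let off := pvBuildOff s polygon
    let total := PySem.List.pyGetD off n 0
    (PySem.List.pyRange 0 (n - 2) 1).any (fun i =>
      if PySem.List.pyGetD off (i + 1) 0 > PySem.List.pyGetD off i 0 then false else
      (PySem.List.pyRange (i + 2) n 1).any (fun j =>
        if i = 0 ∧ j = n - 1 then false
        else if PySem.List.pyGetD off (j + 1) 0 > PySem.List.pyGetD off j 0 then false
        else if PySem.List.pyGetD off j 0 = PySem.List.pyGetD off (i + 1) 0 then false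
        else
          let before := if i ≠ 0 then PySem.List.pyGetD off i 0 else 0
          let after := if j ≠ n - 1 then total - PySem.List.pyGetD off (j + 1) 0 else 0
          decide (before + after > 0))))

-- ===== PRECONDITION & SPEC =====
def Spec_is_dup (lines : List (List Int)) (polygon : List Int) (out : Bool) : Prop := out = is_dup_alt lines polygon
instance (lines : List (List Int)) (polygon : List Int) (out : Bool) : Decidable (Spec_is_dup lines polygon out) := by unfold Spec_is_dup; infer_instance

-- ===== CLAIM (what is proved, stated in full; the proofs are below) =====
def Claim_equal_is_dup : Prop := ∀ (lines : List (List Int)) (polygon : List Int), Dom_is_dup lines polygon → Spec_is_dup lines polygon (is_dup lines polygon)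

-- ===== LEMMAS AND PROOFS =====

-- number of off-line vertices among the first m vertices of the polygon
def pvT (line polygon : List Int) (m : Nat) : Int :=
  ((polygon.take m).countP (fun v => !(line.contains v)) : Int)

lemma pvT_mono (line polygon : List Int) {a b : Nat} (h : a ≤ b) :
    pvT line polygon a ≤ pvT line polygon b := by
  unfold pvT
  have h1 : polygon.take a = (polygon.take b).take a := by
    rw [List.take_take, Nat.min_eq_left h]
  rw [h1]
  exact_mod_cast (List.take_sublist _ _).countP_le

lemma pvT_succ (line polygon : List Int) {m : Nat} (hm : m < polygon.length) :
    pvT line polygon (m + 1)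
      = pvT line polygon m + (if line.contains polygon[m] then 0 else 1) := by
  unfold pvT
  rw [List.take_add_one, List.countP_append, List.getElem?_eq_getElem hm]
  by_cases hc : line.contains polygon[m] <;> simp only [hc] <;>
    simp [List.contains_iff_mem] at hc ⊢ <;> simp [hc]

lemma pvCountLoop_eq (line polygon : List Int) (ls : List Int) (c : Int) :
    pvCountLoop line polygon ls c
      = if ls.any (fun l => !(line.contains (pvGetI polygon l))) then c + 1 else c := by
  induction ls with
  | nil => simp [pvCountLoop]
  | cons l rest ih =>
    simp only [pvCountLoop, List.any_cons]
    by_cases hc : line.contains (pvGetI polygon l) <;>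
      simp only [hc, Bool.not_true, Bool.not_false, Bool.false_or, Bool.true_or,
        if_true, if_false, ih] <;> simp [hc]

lemma pvAnyOff (line polygon : List Int) :
    ∀ (b a : Nat), a ≤ b → b ≤ polygon.length →
    (PySem.List.pyRange (a : Int) (b : Int) 1).any
        (fun l => !(line.contains (pvGetI polygon l)))
      = decide (pvT line polygon a < pvT line polygon b) := by
  intro b
  induction b with
  | zero =>
    intro a ha _
    interval_cases a
    rw [PySem.List.pyRange_one_eq_nil (by omega)]
    simp
  | succ b ih =>
    intro a ha hb
    rcases Nat.lt_or_ge a (b + 1) with hab | hab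
    · have hab' : a ≤ b := by omega
      have hsplit : PySem.List.pyRange (a : Int) ((b + 1 : Nat) : Int) 1
          = PySem.List.pyRange (a : Int) (b : Int) 1 ++ [(b : Int)] := by
        push_cast
        exact PySem.List.pyRange_one_succ_right (by exact_mod_cast hab')
      have hblen : b < polygon.length := by omega
      have hget : pvGetI polygon (b : Int) = polygon[b] := by
        unfold pvGetI
        rw [PySem.List.pyGetD_natCast, List.getD_eq_getElem _ _ hblen]
      rw [hsplit, List.any_append, ih a hab' (by omega),
        pvT_succ line polygon hblen]
      have hmono := pvT_mono line polygon hab'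
      by_cases hc : line.contains polygon[b]
      case pos =>
        have hc' : polygon[b] ∈ line := by simpa [List.contains_iff_mem] using hc
        simp [hc', hget]
      case neg =>
        have hc' : polygon[b] ∉ line := by simpa [List.contains_iff_mem] using hc
        simp [hget, hc']
        omega
    · have : a = b + 1 := by omega
      subst this
      rw [PySem.List.pyRange_one_eq_nil (by omega)]
      simp

lemma pvContains_ofList (line : List Int) (v : Int) :
    PySem.Set.contains (PySem.Set.ofList line) v = line.contains v := by
  rw [Bool.eq_iff_iff, PySem.Set.contains_iff, PySem.Set.mem_ofList, List.contains_iff_mem]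

lemma pvBuildOff_eq (line polygon : List Int) :
    pvBuildOff (PySem.Set.ofList line) polygon
      = (List.range (polygon.length + 1)).map (fun m => pvT line polygon m) := by
  induction polygon using List.reverseRecOn with
  | nil => simp [pvBuildOff, pvT]
  | append_singleton ys v ih =>
    unfold pvBuildOff at ih ⊢
    rw [List.foldl_append, List.foldl_cons, List.foldl_nil, ih]
    have hlast : PySem.List.pyGetD
        ((List.range (ys.length + 1)).map (fun m => pvT line ys m)) (-1) 0
        = pvT line ys ys.length := by
      rw [List.range_succ, List.map_append, List.map_cons, List.map_nil,
        PySem.List.pyGetD_neg_one_append_singleton]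
    rw [hlast]
    have hTkeep : ∀ m, m ≤ ys.length → pvT line (ys ++ [v]) m = pvT line ys m := by
      intro m hm
      unfold pvT
      rw [List.take_append_of_le_length hm]
    have hTlast : pvT line (ys ++ [v]) (ys.length + 1)
        = pvT line ys ys.length + (if PySem.Set.contains (PySem.Set.ofList line) v then 0 else 1) := by
      unfold pvT
      rw [List.take_of_length_le (by simp), List.countP_append,
        List.take_of_length_le (by omega)]
      rw [pvContains_ofList]
      by_cases hc : line.contains v <;> simp [hc]
    rw [List.length_append, List.length_cons, List.length_nil, Nat.add_zero]
    rw [List.range_succ (n := ys.length + 1), List.map_append, List.map_cons,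
      List.map_nil, hTlast]
    congr 1
    apply List.map_congr_left
    intro m hm
    rw [List.mem_range] at hm
    rw [hTkeep m (by omega)]

lemma pvG_eq (line polygon : List Int) {m : Int} (h0 : 0 ≤ m) (h : m ≤ (polygon.length : Int)) :
    PySem.List.pyGetD (pvBuildOff (PySem.Set.ofList line) polygon) m 0
      = pvT line polygon m.toNat := by
  rw [pvBuildOff_eq]
  have hm : m = ((m.toNat : Nat) : Int) := by omega
  rw [hm, PySem.List.pyGetD_natCast]
  have hlt : m.toNat < polygon.length + 1 := by omega
  rw [List.getD_eq_getElem _ _ (by simpa using hlt)]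
  simp
  congr 1
  omega

lemma pvT_nonneg (line polygon : List Int) (m : Nat) : 0 ≤ pvT line polygon m := by
  unfold pvT; positivity

def pvG (line polygon : List Int) (m : Int) : Int :=
  PySem.List.pyGetD (pvBuildOff (PySem.Set.ofList line) polygon) m 0

lemma pvG_def (line polygon : List Int) (m : Int) :
    PySem.List.pyGetD (pvBuildOff (PySem.Set.ofList line) polygon) m 0 = pvG line polygon m := rfl

lemma pvG_nonneg (line polygon : List Int) {m : Int} (h0 : 0 ≤ m)
    (h : m ≤ (polygon.length : Int)) : 0 ≤ pvG line polygon m := by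
  rw [pvG, pvG_eq line polygon h0 h]; exact pvT_nonneg _ _ _

lemma pvG_zero (line polygon : List Int) : pvG line polygon 0 = 0 := by
  rw [pvG, pvG_eq line polygon le_rfl (by positivity)]
  simp [pvT]

lemma pvG_mono (line polygon : List Int) {a b : Int} (h0 : 0 ≤ a) (hab : a ≤ b)
    (hb : b ≤ (polygon.length : Int)) : pvG line polygon a ≤ pvG line polygon b := by
  rw [pvG, pvG, pvG_eq line polygon h0 (by omega), pvG_eq line polygon (by omega) hb]
  exact pvT_mono line polygon (by omega)

lemma pvG_succ (line polygon : List Int) {i : Int} (h0 : 0 ≤ i)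
    (h1 : i < (polygon.length : Int)) :
    pvG line polygon (i + 1)
      = pvG line polygon i + (if line.contains (pvGetI polygon i) then 0 else 1) := by
  rw [pvG, pvG, pvG_eq line polygon (by omega) (by omega), pvG_eq line polygon h0 (by omega)]
  have h2 : (i + 1).toNat = i.toNat + 1 := by omega
  have h3 : i.toNat < polygon.length := by omega
  rw [h2, pvT_succ line polygon h3]
  have h4 : pvGetI polygon i = polygon[i.toNat] := by
    unfold pvGetI
    exact PySem.List.pyGetD_eq_getElem polygon 0 h0 h1
  rw [h4]

lemma pvAnyOffInt (line polygon : List Int) {a b : Int} (h0 : 0 ≤ a) (hab : a ≤ b)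
    (hb : b ≤ (polygon.length : Int)) :
    ((PySem.List.pyRange a b 1).any (fun l => !(line.contains (pvGetI polygon l))) = true)
      ↔ pvG line polygon a < pvG line polygon b := by
  have ha' : a = ((a.toNat : Nat) : Int) := by omega
  have hb' : b = ((b.toNat : Nat) : Int) := by omega
  rw [pvG, pvG, pvG_eq line polygon h0 (by omega), pvG_eq line polygon (by omega) hb]
  rw [ha', hb', pvAnyOff line polygon b.toNat a.toNat (by omega) (by omega)]
  have e1 : (max a 0).toNat = a.toNat := by omega
  have e2 : (max b 0).toNat = b.toNat := by omega
  simp [e1, e2]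

lemma pvIteFalse {c : Prop} [Decidable c] (x : Bool) :
    ((if c then false else x) = true) ↔ (¬ c ∧ x = true) := by
  split <;> simp_all

lemma pvIteTrue {c : Prop} [Decidable c] (x : Bool) :
    ((if c then x else false) = true) ↔ (c ∧ x = true) := by
  split <;> simp_all

lemma pvCountOne (x : Bool) (c : Int) :
    (((if x = true then c + 1 else c) == c + 1) = true) ↔ x = true := by
  cases x <;> simp

theorem is_dup_eq (lines : List (List Int)) (polygon : List Int) :
    is_dup lines polygon = is_dup_alt lines polygon := by
  by_cases h3 : (polygon.length : Int) = 3
  · simp [is_dup, is_dup_alt, h3]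
  · simp only [is_dup, is_dup_alt, if_neg h3, pvG_def]
    rw [Bool.eq_iff_iff]
    constructor
    · -- A ⇒ B
      intro hA
      obtain ⟨i, hiMem, hA⟩ := List.any_eq_true.mp hA
      rw [PySem.List.mem_pyRange_one] at hiMem
      obtain ⟨j, hjMem, hA⟩ := List.any_eq_true.mp hA
      rw [PySem.List.mem_pyRange_one] at hjMem
      obtain ⟨hskip, hA⟩ := (pvIteFalse _).mp hA
      obtain ⟨k, hkMem, hA⟩ := List.any_eq_true.mp hA
      rw [PySem.List.mem_pyRange_one] at hkMem
      obtain ⟨hcont, hOr⟩ := (pvIteTrue _).mp hA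
      rw [Bool.and_eq_true] at hcont
      obtain ⟨hci, hcj⟩ := hcont
      set line := pvGetL lines k with hline
      have hlineMem : line ∈ lines := by
        rw [hline]; unfold pvGetL
        exact PySem.List.pyGetD_mem lines [] (by unfold PySem.Raise.InRange; omega)
      -- the two on-vertex facts
      have hgi : pvG line polygon (i + 1) = pvG line polygon i := by
        rw [pvG_succ line polygon hiMem.1 (by omega), hci]; simp
      have hgj : pvG line polygon (j + 1) = pvG line polygon j := by
        rw [pvG_succ line polygon (by omega) (by omega), hcj]; simp
      -- extract count and the exterior witness
      rw [pvCountLoop_eq] at hOr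
      have hcount : ((PySem.List.pyRange i j 1).any
          (fun l => !(line.contains (pvGetI polygon l)))) = true := by
        rcases Bool.or_eq_true_iff.mp hOr with h | h
        · obtain ⟨hne, h⟩ := (pvIteTrue _).mp h
          obtain ⟨l, _, h⟩ := List.any_eq_true.mp h
          exact (pvCountOne _ 0).mp (Bool.and_eq_true_iff.mp h).1
        · obtain ⟨hne, h⟩ := (pvIteTrue _).mp h
          obtain ⟨l, _, h⟩ := List.any_eq_true.mp h
          exact (pvCountOne _ 0).mp (Bool.and_eq_true_iff.mp h).1
      have hint : pvG line polygon i < pvG line polygon j :=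
        (pvAnyOffInt line polygon hiMem.1 (by omega) (by omega)).mp hcount
      -- exterior: before + after > 0
      have hext : 0 < (if i ≠ 0 then pvG line polygon i else 0) +
          (if j ≠ (polygon.length : Int) - 1 then
            pvG line polygon (polygon.length : Int) - pvG line polygon (j + 1) else 0) := by
        have hbnn : 0 ≤ (if i ≠ 0 then pvG line polygon i else 0) := by
          split
          · exact pvG_nonneg line polygon hiMem.1 (by omega)
          · omega
        have hann : 0 ≤ (if j ≠ (polygon.length : Int) - 1 then
            pvG line polygon (polygon.length : Int) - pvG line polygon (j + 1) else 0) := by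
          split
          · have := pvG_mono line polygon (a := j + 1) (b := (polygon.length : Int))
              (by omega) (by omega) le_rfl
            omega
          · omega
        rcases Bool.or_eq_true_iff.mp hOr with h | h
        · obtain ⟨hne, h⟩ := (pvIteTrue _).mp h
          obtain ⟨l, hlMem, h⟩ := List.any_eq_true.mp h
          have hoff := (Bool.and_eq_true_iff.mp h).2
          have hany : ((PySem.List.pyRange (j + 1) (polygon.length : Int) 1).any
              (fun l => !(line.contains (pvGetI polygon l)))) = true :=
            List.any_eq_true.mpr ⟨l, hlMem, hoff⟩
          have := (pvAnyOffInt line polygon (a := j + 1)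
            (b := (polygon.length : Int)) (by omega) (by omega) le_rfl).mp hany
          rw [if_pos hne]
          omega
        · obtain ⟨hne, h⟩ := (pvIteTrue _).mp h
          obtain ⟨l, hlMem, h⟩ := List.any_eq_true.mp h
          have hoff := (Bool.and_eq_true_iff.mp h).2
          have hany : ((PySem.List.pyRange 0 i 1).any
              (fun l => !(line.contains (pvGetI polygon l)))) = true :=
            List.any_eq_true.mpr ⟨l, hlMem, hoff⟩
          have := (pvAnyOffInt line polygon (a := 0) (b := i) le_rfl
            (by omega) (by omega)).mp hany
          rw [pvG_zero] at this
          rw [if_pos hne]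
          omega
      -- assemble B
      refine List.any_eq_true.mpr ⟨line, hlineMem, ?_⟩
      refine List.any_eq_true.mpr ⟨i, PySem.List.mem_pyRange_one.mpr ⟨hiMem.1, hiMem.2⟩, ?_⟩
      rw [pvIteFalse]
      refine ⟨by omega, ?_⟩
      refine List.any_eq_true.mpr ⟨j, PySem.List.mem_pyRange_one.mpr ⟨hjMem.1, hjMem.2⟩, ?_⟩
      rw [pvIteFalse]
      refine ⟨hskip, ?_⟩
      rw [pvIteFalse]
      refine ⟨by omega, ?_⟩
      rw [pvIteFalse]
      refine ⟨by omega, ?_⟩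
      simpa using hext
    · -- B ⇒ A
      intro hB
      obtain ⟨line, hlineMem, hB⟩ := List.any_eq_true.mp hB
      obtain ⟨i, hiMem, hB⟩ := List.any_eq_true.mp hB
      rw [PySem.List.mem_pyRange_one] at hiMem
      obtain ⟨honI, hB⟩ := (pvIteFalse _).mp hB
      obtain ⟨j, hjMem, hB⟩ := List.any_eq_true.mp hB
      rw [PySem.List.mem_pyRange_one] at hjMem
      obtain ⟨hskip, hB⟩ := (pvIteFalse _).mp hB
      obtain ⟨honJ, hB⟩ := (pvIteFalse _).mp hB
      obtain ⟨hintB, hB⟩ := (pvIteFalse _).mp hB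
      have hext := of_decide_eq_true hB
      -- on-vertex membership
      have hci : line.contains (pvGetI polygon i) = true := by
        by_contra hc
        have := pvG_succ line polygon hiMem.1 (i := i) (by omega)
        rw [Bool.not_eq_true] at hc
        rw [hc] at this
        simp at this
        have hmono := pvG_mono line polygon (a := i) (b := i + 1) hiMem.1 (by omega) (by omega)
        omega
      have hcj : line.contains (pvGetI polygon j) = true := by
        by_contra hc
        have := pvG_succ line polygon (i := j) (by omega) (by omega)
        rw [Bool.not_eq_true] at hc
        rw [hc] at this
        simp at this
        omega
      have hgi : pvG line polygon (i + 1) = pvG line polygon i := by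
        rw [pvG_succ line polygon hiMem.1 (by omega), hci]; simp
      -- interior off-vertex exists
      have hmono1 := pvG_mono line polygon (a := i + 1) (b := j) (by omega) (by omega) (by omega)
      have hcount : ((PySem.List.pyRange i j 1).any
          (fun l => !(line.contains (pvGetI polygon l)))) = true := by
        refine (pvAnyOffInt line polygon hiMem.1 (by omega) (by omega)).mpr ?_
        omega
      -- index of line
      obtain ⟨m, hm, hmEq⟩ := List.mem_iff_getElem.mp hlineMem
      have hkEq : pvGetL lines ((m : Nat) : Int) = line := by
        unfold pvGetL
        rw [PySem.List.pyGetD_natCast, List.getD_eq_getElem _ _ hm, hmEq]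
      -- assemble A
      refine List.any_eq_true.mpr ⟨i, PySem.List.mem_pyRange_one.mpr ⟨hiMem.1, hiMem.2⟩, ?_⟩
      refine List.any_eq_true.mpr ⟨j, PySem.List.mem_pyRange_one.mpr ⟨hjMem.1, hjMem.2⟩, ?_⟩
      rw [pvIteFalse]
      refine ⟨hskip, ?_⟩
      refine List.any_eq_true.mpr ⟨((m : Nat) : Int),
        PySem.List.mem_pyRange_one.mpr ⟨by omega, by exact_mod_cast hm⟩, ?_⟩
      rw [hkEq, pvIteTrue]
      refine ⟨by rw [Bool.and_eq_true]; exact ⟨hci, hcj⟩, ?_⟩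
      rw [pvCountLoop_eq, Bool.or_eq_true]
      -- pick the side with an exterior off-vertex
      by_cases hafter : j ≠ (polygon.length : Int) - 1 ∧
          pvG line polygon (j + 1) < pvG line polygon (polygon.length : Int)
      · left
        rw [if_pos hafter.1]
        have hany := (pvAnyOffInt line polygon (a := j + 1)
          (b := (polygon.length : Int)) (by omega) (by omega) le_rfl).mpr hafter.2
        obtain ⟨l, hlMem, hoff⟩ := List.any_eq_true.mp hany
        refine List.any_eq_true.mpr ⟨l, hlMem, ?_⟩
        rw [Bool.and_eq_true]
        exact ⟨(pvCountOne _ 0).mpr hcount, hoff⟩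
      · right
        have hbefore : i ≠ 0 ∧ 0 < pvG line polygon i := by
          by_cases hje : j = (polygon.length : Int) - 1
          · constructor
            · intro h0
              exact hskip ⟨h0, hje⟩
            · have h1 : (if j ≠ (polygon.length : Int) - 1 then
                  pvG line polygon (polygon.length : Int) - pvG line polygon (j + 1)
                  else 0) = 0 := by rw [if_neg (by omega)]
              rw [h1] at hext
              by_cases hi0 : i = 0
              · rw [hi0] at hext
                simp at hext
              · rw [if_pos hi0] at hext
                omega
          · have h2 := pvG_mono line polygon (a := j + 1)
              (b := (polygon.length : Int)) (by omega) (by omega) le_rfl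
            have h3 : pvG line polygon (j + 1) = pvG line polygon (polygon.length : Int) := by
              rcases not_and_or.mp hafter with h | h
              · exact absurd hje h
              · omega
            rw [if_pos hje, h3] at hext
            by_cases hi0 : i = 0
            · rw [hi0] at hext
              simp at hext
            · rw [if_pos hi0] at hext
              exact ⟨hi0, by omega⟩
        rw [if_pos hbefore.1]
        have hany := (pvAnyOffInt line polygon (a := 0) (b := i) le_rfl
          (by omega) (by omega)).mpr (by rw [pvG_zero]; exact hbefore.2)
        obtain ⟨l, hlMem, hoff⟩ := List.any_eq_true.mp hany
        refine List.any_eq_true.mpr ⟨l, hlMem, ?_⟩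
        rw [Bool.and_eq_true]
        exact ⟨(pvCountOne _ 0).mpr hcount, hoff⟩

-- ===== VERDICT (by name: the statement is the Claim_ definition above) =====
theorem is_dup_spec : Claim_equal_is_dup := by
  intro lines polygon _
  unfold Spec_is_dup
  exact is_dup_eq lines polygon
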